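-- pv_equiv track=rewrite | github.com/trenBarrow/self-play-posttraining-demo | tools/mavlink_real/pcap_capture.py | ordered_capture_interfaces
-- ===== SOURCE A (Python) =====
-- def is_loopback_interface(name: str) -> bool:
--     return name.lower().startswith("lo")
--
-- def ordered_capture_interfaces(
--     interfaces: list[str],
--     override: str | None = None,
--     preferred_interface: str | None = None,
-- ) -> list[str]:
--     chosen_override = (override or "").strip()
--     if chosen_override:
--         return [chosen_override]
--
--     ranked: list[tuple[int, int, str]] = []
--     for index, name in enumerate(interfaces):
--         lower = name.lower()
--         if is_loopback_interface(lower):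
--             continue
--         if preferred_interface and name == preferred_interface:
--             bucket = 0
--         elif lower == "bridge100":
--             bucket = 1
--         elif lower.startswith("vmenet"):
--             bucket = 2
--         elif lower == "docker0":
--             bucket = 3
--         elif lower.startswith("br-"):
--             bucket = 4
--         elif lower.startswith("cni"):
--             bucket = 5
--         else:
--             bucket = 6
--         ranked.append((bucket, index, name))
--     ranked.sort(key=lambda item: (item[0], item[1], item[2]))
--     return [name for _, _, name in ranked]
-- ===== SOURCE B (Python) =====
-- def is_loopback_interface(name: str) -> bool:
--     return name.lower().startswith("lo")
--
-- def ordered_capture_interfaces(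
--     interfaces: list[str],
--     override: str | None = None,
--     preferred_interface: str | None = None,
-- ) -> list[str]:
--     chosen_override = (override or "").strip()
--     if chosen_override:
--         return [chosen_override]
--
--     # distribution into seven priority buckets: one pass, no sort
--     b0, b1, b2, b3, b4, b5, b6 = [], [], [], [], [], [], []
--     for name in interfaces:
--         lower = name.lower()
--         if is_loopback_interface(lower):
--             continue
--         if preferred_interface and name == preferred_interface:
--             b0.append(name)
--         elif lower == "bridge100":
--             b1.append(name)
--         elif lower.startswith("vmenet"):
--             b2.append(name)
--         elif lower == "docker0":
--             b3.append(name)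
--         elif lower.startswith("br-"):
--             b4.append(name)
--         elif lower.startswith("cni"):
--             b5.append(name)
--         else:
--             b6.append(name)
--     return b0 + b1 + b2 + b3 + b4 + b5 + b6
-- ===== Notes on version B (the rewrite author's own statement) =====
-- stated objective: alternative
-- what changed: Replaces the rank-tuples-then-comparison-sort with a single-pass distribution into seven priority buckets concatenated 0..6 (bucket sort; no enumerate, no tuples, no sort).
import Mathlib
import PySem

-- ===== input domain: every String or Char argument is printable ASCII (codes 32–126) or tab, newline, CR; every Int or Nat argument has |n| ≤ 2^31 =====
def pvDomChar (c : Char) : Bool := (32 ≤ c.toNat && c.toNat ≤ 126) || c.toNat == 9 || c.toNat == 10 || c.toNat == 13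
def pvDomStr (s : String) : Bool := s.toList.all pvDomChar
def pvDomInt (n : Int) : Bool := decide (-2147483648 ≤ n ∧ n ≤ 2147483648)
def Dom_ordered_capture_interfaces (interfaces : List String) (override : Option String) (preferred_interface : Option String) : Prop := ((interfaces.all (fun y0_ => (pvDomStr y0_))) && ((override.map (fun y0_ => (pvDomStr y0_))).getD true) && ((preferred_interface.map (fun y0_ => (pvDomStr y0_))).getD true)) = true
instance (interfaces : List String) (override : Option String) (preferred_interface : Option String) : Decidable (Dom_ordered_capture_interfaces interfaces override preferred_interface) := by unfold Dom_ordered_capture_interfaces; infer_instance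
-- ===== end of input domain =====

-- B replaces A's rank-tuples-then-sort with a one-pass distribution into seven priority buckets concatenated 0..6 (same return value; no speed claim).


-- ===== PORT A =====
-- is_loopback_interface: name.lower().startswith("lo")
def pvIsLoopback (name : String) : Bool := PySem.Str.startswith (PySem.Str.lower name) "lo"

-- the if/elif bucket chain that appears verbatim in both Pythons
-- ('preferred_interface and name == preferred_interface' = pref is a non-empty string and name equals it)
def pvBucket (preferred_interface : Option String) (name lower : String) : Int :=
  if (match preferred_interface with
      | some p => !p.toList.isEmpty && (name == p)
      | none => false) then 0
  else if lower == "bridge100" then 1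
  else if PySem.Str.startswith lower "vmenet" then 2
  else if lower == "docker0" then 3
  else if PySem.Str.startswith lower "br-" then 4
  else if PySem.Str.startswith lower "cni" then 5
  else 6

def ordered_capture_interfaces (interfaces : List String) (override : Option String) (preferred_interface : Option String) : List String :=
  let chosen_override := PySem.Str.strip (override.getD "")
  if !chosen_override.toList.isEmpty then [chosen_override]
  else
    let ranked : List (Int × Int × String) :=
      (PySem.List.enumerate interfaces 0).foldl
        (fun acc p =>
          let lower := PySem.Str.lower p.2
          if pvIsLoopback lower then acc
          else acc ++ [(pvBucket preferred_interface p.2 lower, p.1, p.2)]) []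
    -- ranked.sort(key = the (bucket, index, name) triple), ported as the two-component key:
    -- the name component is a dead tie-breaker because the index components are pairwise distinct
    (PySem.List.sorted2 ranked (fun t => t.1) (fun t => t.2.1)).map (fun t => t.2.2)

-- ===== PORT B =====
structure PvBuckets where
  b0 : List String
  b1 : List String
  b2 : List String
  b3 : List String
  b4 : List String
  b5 : List String
  b6 : List String
deriving Repr, DecidableEq

-- loop body of Source B: skip loopback, append name to the bucket picked by the if/elif chain
def pvStepB (preferred_interface : Option String) (bs : PvBuckets) (name : String) : PvBuckets :=
  let lower := PySem.Str.lower name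
  if pvIsLoopback lower then bs
  else
    match pvBucket preferred_interface name lower with
    | 0 => { bs with b0 := bs.b0 ++ [name] }
    | 1 => { bs with b1 := bs.b1 ++ [name] }
    | 2 => { bs with b2 := bs.b2 ++ [name] }
    | 3 => { bs with b3 := bs.b3 ++ [name] }
    | 4 => { bs with b4 := bs.b4 ++ [name] }
    | 5 => { bs with b5 := bs.b5 ++ [name] }
    | _ => { bs with b6 := bs.b6 ++ [name] }

def ordered_capture_interfaces_alt (interfaces : List String) (override : Option String) (preferred_interface : Option String) : List String :=
  let chosen_override := PySem.Str.strip (override.getD "")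
  if !chosen_override.toList.isEmpty then [chosen_override]
  else
    let bs := interfaces.foldl (pvStepB preferred_interface) ⟨[], [], [], [], [], [], []⟩
    bs.b0 ++ bs.b1 ++ bs.b2 ++ bs.b3 ++ bs.b4 ++ bs.b5 ++ bs.b6

-- ===== PRECONDITION & SPEC =====
def Spec_ordered_capture_interfaces (interfaces : List String) (override : Option String) (preferred_interface : Option String) (out : List String) : Prop := out = ordered_capture_interfaces_alt interfaces override preferred_interface
instance (interfaces : List String) (override : Option String) (preferred_interface : Option String) (out : List String) : Decidable (Spec_ordered_capture_interfaces interfaces override preferred_interface out) := by unfold Spec_ordered_capture_interfaces; infer_instance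

-- ===== CLAIM (what is proved, stated in full; the proofs are below) =====
def Claim_equal_ordered_capture_interfaces : Prop := ∀ (interfaces : List String) (override : Option String) (preferred_interface : Option String), Dom_ordered_capture_interfaces interfaces override preferred_interface → Spec_ordered_capture_interfaces interfaces override preferred_interface (ordered_capture_interfaces interfaces override preferred_interface)

-- ===== LEMMAS AND PROOFS =====

-- the names B's loop puts into bucket k, in original order
def pvColl (pref : Option String) (k : Int) (xs : List String) : List String :=
  xs.filter (fun n => !pvIsLoopback (PySem.Str.lower n) && (pvBucket pref n (PySem.Str.lower n) == k))

-- every bucket value is one of 0..6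
theorem pvBucket_mem (pref : Option String) (name lower : String) :
    pvBucket pref name lower ∈ ([0, 1, 2, 3, 4, 5, 6] : List Int) := by
  unfold pvBucket; split_ifs <;> simp

-- one inserted element distributes to exactly one filter bucket
theorem pv_flatMap_filter_cons_perm {α : Type} (f : α → Int) (x : α) (xs : List α) :
    ∀ (ks : List Int), ks.Nodup → f x ∈ ks →
      (ks.flatMap (fun k => (x :: xs).filter (fun t => f t == k))).Perm
        (x :: ks.flatMap (fun k => xs.filter (fun t => f t == k))) := by
  intro ks
  induction ks with
  | nil => intro _ h; simp at h
  | cons k ks ih =>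
      intro hnd hx
      rcases List.nodup_cons.mp hnd with ⟨hk, hnd'⟩
      rw [List.flatMap_cons, List.flatMap_cons]
      by_cases hfx : f x = k
      · have hrest : ks.flatMap (fun k' => (x :: xs).filter (fun t => f t == k'))
            = ks.flatMap (fun k' => xs.filter (fun t => f t == k')) := by
          apply List.flatMap_congr
          intro k' hk'
          have : f x ≠ k' := fun h => hk (by rw [← hfx, h]; exact hk')
          simp [this]
        rw [hrest, List.filter_cons, if_pos (by simp [hfx])]
        simp
      · have hxk : f x ∈ ks := by
          rcases List.mem_cons.mp hx with h | h
          · exact absurd h hfx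
          · exact h
        rw [List.filter_cons, if_neg (by simp [hfx])]
        refine ((ih hnd' hxk).append_left _).trans ?_
        exact List.perm_middle
-- concatenating the filter buckets over distinct keys is a permutation of the list
theorem pv_perm_flatMap_filter {α : Type} (f : α → Int) (ks : List Int) (xs : List α)
    (hnd : ks.Nodup) (hmem : ∀ t ∈ xs, f t ∈ ks) :
    (ks.flatMap (fun k => xs.filter (fun t => f t == k))).Perm xs := by
  induction xs with
  | nil => simp
  | cons x xs ih =>
      refine (pv_flatMap_filter_cons_perm f x xs ks hnd (hmem x (by simp))).trans ?_
      exact (ih (fun t ht => hmem t (by simp [ht]))).cons x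

-- the concatenated buckets are strictly increasing in the lexicographic (bucket, index) key
theorem pv_pairwise_flatMap_filter {α : Type} (f g : α → Int) (ks : List Int) (xs : List α)
    (hks : ks.Pairwise (· < ·)) (hxs : xs.Pairwise (fun a b => g a < g b)) :
    (ks.flatMap (fun k => xs.filter (fun t => f t == k))).Pairwise
      (fun a b => toLex (f a, g a) < toLex (f b, g b)) := by
  induction ks with
  | nil => simp
  | cons k ks ih =>
      rcases List.pairwise_cons.mp hks with ⟨hlt, hks'⟩
      rw [List.flatMap_cons, List.pairwise_append]
      refine ⟨?_, ih hks', ?_⟩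
      · refine (List.Pairwise.filter _ hxs).imp_of_mem ?_
        intro a b ha hb hab
        have hfa : f a = k := by simpa using (List.mem_filter.mp ha).2
        have hfb : f b = k := by simpa using (List.mem_filter.mp hb).2
        rw [Prod.Lex.lt_iff]
        right
        exact ⟨by simp [hfa, hfb], hab⟩
      · intro a ha b hb
        have hfa : f a = k := by simpa using (List.mem_filter.mp ha).2
        rcases List.mem_flatMap.mp hb with ⟨k', hk', hbk'⟩
        have hfb : f b = k' := by simpa using (List.mem_filter.mp hbk').2
        rw [Prod.Lex.lt_iff]
        left
        simp only [hfa, hfb]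
        exact hlt _ hk'

-- Python's sort by the pair key IS the sort by the lexicographic key
theorem pv_sorted2_eq_sorted_lex {α : Type} (xs : List α) (k1 k2 : α → Int) :
    PySem.List.sorted2 xs k1 k2 = PySem.List.sorted xs (fun x => toLex (k1 x, k2 x)) := by
  rw [PySem.List.sorted_eq_foldl_insertBy]
  simp only [PySem.List.sorted2]
  have heq : (fun a b => decide (k1 a < k1 b) || (!decide (k1 b < k1 a) && decide (k2 a < k2 b)))
      = (fun a b => decide ((fun x => toLex (k1 x, k2 x)) a < (fun x => toLex (k1 x, k2 x)) b)) := by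
    funext a b
    by_cases h1 : k1 a < k1 b <;> by_cases h2 : k1 b < k1 a <;> by_cases h3 : k2 a < k2 b <;>
      simp [h1, h2, h3, Prod.Lex.lt_iff] <;> omega
  simp only [heq]
  simp

-- A's ranking loop builds the kept triples in order
theorem pv_foldA (pref : Option String) (xs : List String) :
    (PySem.List.enumerate xs 0).foldl
      (fun acc p =>
        let lower := PySem.Str.lower p.2
        if pvIsLoopback lower then acc
        else acc ++ [(pvBucket pref p.2 lower, p.1, p.2)]) []
    = ((PySem.List.enumerate xs 0).filter (fun p => !pvIsLoopback (PySem.Str.lower p.2))).map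
        (fun p => (pvBucket pref p.2 (PySem.Str.lower p.2), p.1, p.2)) := by
  have hfun : (fun (acc : List (Int × Int × String)) (p : Int × String) =>
        let lower := PySem.Str.lower p.2
        if pvIsLoopback lower then acc
        else acc ++ [(pvBucket pref p.2 lower, p.1, p.2)])
      = (fun acc p =>
        if !pvIsLoopback (PySem.Str.lower p.2) then
          acc ++ [(pvBucket pref p.2 (PySem.Str.lower p.2), p.1, p.2)]
        else acc) := by
    funext acc p
    cases h : pvIsLoopback (PySem.Str.lower p.2) <;> simp [h]
  rw [hfun, PySem.List.foldl_append_if]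
  simp

-- B's loop appends each kept name to exactly the bucket the chain picks
theorem pv_foldB (pref : Option String) (xs : List String) : ∀ (bs : PvBuckets),
    xs.foldl (pvStepB pref) bs =
      ⟨bs.b0 ++ pvColl pref 0 xs, bs.b1 ++ pvColl pref 1 xs, bs.b2 ++ pvColl pref 2 xs,
       bs.b3 ++ pvColl pref 3 xs, bs.b4 ++ pvColl pref 4 xs, bs.b5 ++ pvColl pref 5 xs,
       bs.b6 ++ pvColl pref 6 xs⟩ := by
  induction xs with
  | nil => intro bs; simp [pvColl]
  | cons x xs ih =>
      intro bs
      rw [List.foldl_cons, ih]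
      by_cases hl : pvIsLoopback (PySem.Str.lower x)
      · simp [pvStepB, pvColl, hl]
      · have hb := pvBucket_mem pref x (PySem.Str.lower x)
        simp only [List.mem_cons] at hb
        rcases hb with hb | hb | hb | hb | hb | hb | hb | hb <;>
          first
          | exact absurd hb (List.not_mem_nil)
          | simp [pvStepB, pvColl, hl, hb]
-- per bucket, the names of A's sorted block = B's bucket contents
theorem pv_bucket_names (pref : Option String) (k : Int) (xs : List String) : ∀ (s : Int),
    ((((PySem.List.enumerate xs s).filter (fun p => !pvIsLoopback (PySem.Str.lower p.2))).map
        (fun p => (pvBucket pref p.2 (PySem.Str.lower p.2), p.1, p.2))).filter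
          (fun t => t.1 == k)).map (fun t => t.2.2) = pvColl pref k xs := by
  induction xs with
  | nil => intro s; simp [PySem.List.enumerate_nil, pvColl]
  | cons x xs ih =>
      intro s
      rw [PySem.List.enumerate_cons]
      by_cases hl : pvIsLoopback (PySem.Str.lower x) <;>
        by_cases hb : pvBucket pref x (PySem.Str.lower x) == k <;>
          simp [hl, hb, pvColl, ih (s + 1)]

-- ===== VERDICT (by name: the statement is the Claim_ definition above) =====
theorem ordered_capture_interfaces_spec : Claim_equal_ordered_capture_interfaces := by
  intro interfaces override pref _
  unfold Spec_ordered_capture_interfaces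
  unfold ordered_capture_interfaces ordered_capture_interfaces_alt
  cases hc : (PySem.Str.strip (override.getD "")).toList.isEmpty with
  | false =>
    have hne : PySem.Chars.strip (override.getD "").toList ≠ [] := by
      simpa using hc
    simp [hne]
  | true =>
    simp only [hc, Bool.not_true, Bool.false_eq_true, if_false]
    rw [pv_foldA, pv_foldB]
    set E := (PySem.List.enumerate interfaces 0).filter (fun p => !pvIsLoopback (PySem.Str.lower p.2)) with hE
    set R := E.map (fun p => (pvBucket pref p.2 (PySem.Str.lower p.2), p.1, p.2)) with hR
    have hpw : R.Pairwise (fun a b => a.2.1 < b.2.1) := by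
      rw [hR, List.pairwise_map]
      exact List.Pairwise.filter _ (PySem.List.pairwise_lt_enumerate interfaces 0)
    have hmem : ∀ t ∈ R, t.1 ∈ ([0, 1, 2, 3, 4, 5, 6] : List Int) := by
      intro t ht
      rcases List.mem_map.mp ht with ⟨p, _, hp⟩
      rw [← hp]
      exact pvBucket_mem pref p.2 (PySem.Str.lower p.2)
    have hsort : PySem.List.sorted2 R (fun t => t.1) (fun t => t.2.1)
        = ([0, 1, 2, 3, 4, 5, 6] : List Int).flatMap (fun k => R.filter (fun t => t.1 == k)) := by
      rw [pv_sorted2_eq_sorted_lex]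
      exact PySem.List.sorted_eq_of_perm_of_pairwise_lt R _ (fun t => toLex (t.1, t.2.1))
        (pv_perm_flatMap_filter (fun t => t.1) ([0, 1, 2, 3, 4, 5, 6] : List Int) R (by decide) hmem)
        (pv_pairwise_flatMap_filter (fun t => t.1) (fun t => t.2.1) ([0, 1, 2, 3, 4, 5, 6] : List Int) R (by decide) hpw)
    rw [hsort, List.map_flatMap]
    have hcoll : ∀ k : Int, (R.filter (fun t => t.1 == k)).map (fun t => t.2.2) = pvColl pref k interfaces := by
      intro k
      rw [hR, hE]
      exact pv_bucket_names pref k interfaces 0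
    simp only [List.flatMap_cons, List.flatMap_nil, hcoll, List.append_nil, List.append_assoc,
      List.nil_append]
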